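-- pv_equiv track=rewrite | github.com/MWcodevu/DnD | D20sNuts.py | crits
-- ===== SOURCE A (Python) =====
-- def crits(initiatives,funct):
--     crit_hits = {}
--     crit_fails = {}
--     non_criticals = {}
--     for i in initiatives:
--         if funct:
--             if initiatives[i] > 50:
--                 crit_hits[i] = initiatives[i]
--             elif initiatives[i] < -50:
--                 crit_fails[i] = initiatives[i]
--             else:
--                 non_criticals[i] = initiatives[i]
--     return crit_hits,non_criticals,crit_fails
-- ===== SOURCE B (Python) =====
-- def crits(initiatives, funct):
--     def go(items):
--         if not items:
--             return [], [], []
--         if len(items) == 1: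
--             (k, v) = items[0]
--             if v > 50:
--                 return [(k, v)], [], []
--             if v < -50:
--                 return [], [], [(k, v)]
--             return [], [(k, v)], []
--         mid = len(items) // 2
--         h1, n1, f1 = go(items[:mid])
--         h2, n2, f2 = go(items[mid:])
--         return h1 + h2, n1 + n2, f1 + f2
--
--     hits, nons, fails = go(list(initiatives.items()) if funct else [])
--     return dict(hits), dict(nons), dict(fails)
-- ===== Notes on version B (the rewrite author's own statement) =====
-- stated objective: alternative
-- what changed: Replaces A's single loop threading three accumulator dicts with a divide-and-conquer recursion: split the item list in half, partition each half independently, concatenate the three buckets, and build the result dicts only at the end from plain pair lists; the funct guard is hoisted out. Pre_ excludes only duplicate-key association lists, which cannot arise from a Python dict argument.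
import Mathlib
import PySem

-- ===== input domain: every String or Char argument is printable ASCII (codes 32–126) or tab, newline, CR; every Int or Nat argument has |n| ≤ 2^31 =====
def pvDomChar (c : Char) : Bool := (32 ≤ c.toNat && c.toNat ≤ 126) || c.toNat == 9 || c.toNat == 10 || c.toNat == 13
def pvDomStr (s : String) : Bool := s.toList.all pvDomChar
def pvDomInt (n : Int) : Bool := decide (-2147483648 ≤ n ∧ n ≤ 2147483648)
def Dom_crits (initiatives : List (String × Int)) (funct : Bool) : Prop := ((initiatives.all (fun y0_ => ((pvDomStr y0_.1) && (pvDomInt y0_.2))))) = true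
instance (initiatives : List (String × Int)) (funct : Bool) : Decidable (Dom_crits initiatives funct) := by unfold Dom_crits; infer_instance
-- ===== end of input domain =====

-- B replaces A's single dict-threading loop with a divide-and-conquer partition of the item
-- list (split in half, recurse, concatenate buckets), building dicts only at the end.


-- ===== PORT A =====
-- A's loop over the dict's keys: 'for i in initiatives' with lookups 'initiatives[i]'
-- visits exactly the (key, value) pairs; it threads the three result dicts as one accumulator.
def critsLoop (funct : Bool) (l : List (String × Int))
    (acc : PySem.Dict String Int × PySem.Dict String Int × PySem.Dict String Int) :
    PySem.Dict String Int × PySem.Dict String Int × PySem.Dict String Int :=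
  match l with
  | [] => acc
  | p :: rest =>
      critsLoop funct rest
        (if funct then
          (if p.2 > 50 then (acc.1.insert p.1 p.2, acc.2.1, acc.2.2)
           else if p.2 < -50 then (acc.1, acc.2.1, acc.2.2.insert p.1 p.2)
           else (acc.1, acc.2.1.insert p.1 p.2, acc.2.2))
         else acc)

def crits (initiatives : List (String × Int)) (funct : Bool) : (List (String × Int)) × (List (String × Int)) × (List (String × Int)) :=
  let r := critsLoop funct initiatives (PySem.Dict.empty, PySem.Dict.empty, PySem.Dict.empty)
  (r.1.items, r.2.1.items, r.2.2.items)

-- ===== PORT B =====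
-- B's recursion 'go': split the item list in half, partition each half, concatenate the
-- three buckets; dicts are built only at the end via dict(...).
def critsGo : List (String × Int) → (List (String × Int)) × (List (String × Int)) × (List (String × Int))
  | [] => ([], [], [])
  | [(k, v)] =>
      if v > 50 then ([(k, v)], [], [])
      else if v < -50 then ([], [], [(k, v)])
      else ([], [(k, v)], [])
  | p :: q :: rest =>
      let l := p :: q :: rest
      let mid := l.length / 2
      let r1 := critsGo (l.take mid)
      let r2 := critsGo (l.drop mid)
      (r1.1 ++ r2.1, r1.2.1 ++ r2.2.1, r1.2.2 ++ r2.2.2)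
termination_by l => l.length
decreasing_by
  all_goals simp [List.length_take, List.length_drop]
  all_goals omega

def crits_alt (initiatives : List (String × Int)) (funct : Bool) : (List (String × Int)) × (List (String × Int)) × (List (String × Int)) :=
  let r := critsGo (if funct then initiatives else [])
  ((PySem.Dict.ofList r.1).items, (PySem.Dict.ofList r.2.1).items, (PySem.Dict.ofList r.2.2).items)

-- ===== PRECONDITION & SPEC =====
-- Pre_ excludes association lists with duplicate keys: such inputs cannot arise from a
-- Python dict argument (dict keys are unique), and the bucket/order behaviour there is
-- an artefact of the list representation, not of either Python program.
def Pre_crits (initiatives : List (String × Int)) (funct : Bool) : Prop :=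
  (initiatives.map Prod.fst).Nodup
instance (initiatives : List (String × Int)) (funct : Bool) : Decidable (Pre_crits initiatives funct) := by unfold Pre_crits; infer_instance

def pvWitness_crits : (List (String × Int)) × Bool := ([("goblin", 60), ("elf", -70), ("orc", 3)], true)

def Spec_crits (initiatives : List (String × Int)) (funct : Bool) (out : (List (String × Int)) × (List (String × Int)) × (List (String × Int))) : Prop := out = crits_alt initiatives funct
instance (initiatives : List (String × Int)) (funct : Bool) (out : (List (String × Int)) × (List (String × Int)) × (List (String × Int))) : Decidable (Spec_crits initiatives funct out) := by unfold Spec_crits; infer_instance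

-- ===== CLAIM (what is proved, stated in full; the proofs are below) =====
def Claim_equal_crits : Prop := ∀ (initiatives : List (String × Int)) (funct : Bool), Dom_crits initiatives funct → Pre_crits initiatives funct → Spec_crits initiatives funct (crits initiatives funct)

-- ===== LEMMAS AND PROOFS =====

-- A's triple-accumulator loop decomposes into three independent insert-folds over
-- the filtered pair lists.
theorem critsLoop_eq (funct : Bool) (l : List (String × Int))
    (h f n : PySem.Dict String Int) :
    critsLoop funct l (h, n, f) =
      ((l.filter (fun p => funct && decide (p.2 > 50))).foldl (fun d p => d.insert p.1 p.2) h,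
       (l.filter (fun p => funct && decide (¬ p.2 > 50 ∧ ¬ p.2 < -50))).foldl (fun d p => d.insert p.1 p.2) n,
       (l.filter (fun p => funct && decide (p.2 < -50))).foldl (fun d p => d.insert p.1 p.2) f) := by
  induction l generalizing h n f with
  | nil => rfl
  | cons p rest ih =>
      cases funct with
      | false => simpa [critsLoop] using ih h f n
      | true =>
          simp only [critsLoop, List.filter_cons]
          split_ifs with h1 h2 <;>
            simp_all <;> first | exact ih _ _ _ | omega

-- B's divide-and-conquer recursion computes the three filtered sublists.
theorem critsGo_eq (l : List (String × Int)) :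
    critsGo l =
      (l.filter (fun p => decide (p.2 > 50)),
       l.filter (fun p => decide (¬ p.2 > 50 ∧ ¬ p.2 < -50)),
       l.filter (fun p => decide (p.2 < -50))) := by
  induction l using critsGo.induct with
  | case1 => simp [critsGo]
  | case5 p q rest x y ih1 ih2 =>
      simp only [critsGo, List.length_cons]
      simp only [x, y, List.length_cons] at ih1 ih2
      rw [ih1, ih2]
      simp [← List.filter_append]
  | _ =>
      simp only [critsGo]
      split_ifs <;> simp_all [List.filter_cons] <;> omega

-- Inserting a list with pairwise-distinct keys into the empty dict reproduces the list.
theorem items_insertFold_nodup (l : List (String × Int)) (h : (l.map Prod.fst).Nodup) :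
    (List.foldl (fun d p => d.insert p.1 p.2) PySem.Dict.empty l).items = l := by
  have := PySem.Dict.items_foldl_insert_fresh l Prod.fst Prod.snd PySem.Dict.empty
    (fun a _ => by simp [PySem.Dict.contains_empty]) h
  simpa using this

theorem items_ofList_nodup (l : List (String × Int)) (h : (l.map Prod.fst).Nodup) :
    (PySem.Dict.ofList l).items = l :=
  items_insertFold_nodup l h

-- ===== VERDICT (by name: the statement is the Claim_ definition above) =====
theorem crits_spec : Claim_equal_crits := by
  intro initiatives funct _ hpre
  unfold Spec_crits crits crits_alt
  have hsub : ∀ (q : String × Int → Bool),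
      ((initiatives.filter q).map Prod.fst).Nodup :=
    fun q => by
      have : (initiatives.filter q).Sublist initiatives := List.filter_sublist
      exact ((this.map Prod.fst).nodup hpre)
  cases funct with
  | false =>
      simp [critsLoop_eq, critsGo_eq, PySem.Dict.ofList, PySem.Dict.update]
  | true =>
      simp only [critsLoop_eq, critsGo_eq, Bool.true_and, if_pos]
      rw [items_ofList_nodup _ (hsub _), items_ofList_nodup _ (hsub _), items_ofList_nodup _ (hsub _),
        items_insertFold_nodup _ (hsub _), items_insertFold_nodup _ (hsub _), items_insertFold_nodup _ (hsub _)]
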